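-- pv_equiv track=rewrite | github.com/StudyForCoding-BJ/BAEKJOON | 08_Math1/Step06/2775.py | floor
-- ===== SOURCE A (Python) =====
-- def floor(a, b: int):
--     fl = list(range(1,b+1))
--     pplfl = [0]*b
--     num = 1
--     while num <= a:
--         for i in range(len(fl)):
--             ppl = 0
--             for j in range(0, i+1):
--                 ppl += fl[j]
--             pplfl[i] = ppl
--         num += 1
--         for i in range(len(fl)):
--             fl[i] = pplfl[i]
--     return fl[b-1]
-- ===== SOURCE B (Python) =====
-- def floor(a, b: int):
--     # Closed form: the answer is the binomial coefficient C(a+b, b-1),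
--     # computed as a running product (a <= 0 iterations leave the initial row: room b -> b people).
--     if a <= 0:
--         return b
--     n = a + b
--     k = b - 1
--     r = 1
--     for i in range(1, k + 1):
--         r = r * (n - k + i) // i
--     return r
-- ===== Notes on version B (the rewrite author's own statement) =====
-- stated objective: faster
-- what changed: Replaced the triple loop that rebuilds every prefix sum a times by the closed form C(a+b, b-1), computed with a single O(b) running-product loop with exact integer division.
import Mathlib
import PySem

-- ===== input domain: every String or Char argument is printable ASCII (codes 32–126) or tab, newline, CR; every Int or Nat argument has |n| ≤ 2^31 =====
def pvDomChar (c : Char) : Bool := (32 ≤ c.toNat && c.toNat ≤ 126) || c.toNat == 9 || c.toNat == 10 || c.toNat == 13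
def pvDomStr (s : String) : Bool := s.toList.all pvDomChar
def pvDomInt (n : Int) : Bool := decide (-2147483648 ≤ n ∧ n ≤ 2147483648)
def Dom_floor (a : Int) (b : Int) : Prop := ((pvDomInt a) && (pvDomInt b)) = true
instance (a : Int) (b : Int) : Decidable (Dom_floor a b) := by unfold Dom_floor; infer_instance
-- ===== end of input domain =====

-- B replaces A's triple loop of re-computed prefix sums by the closed form C(a+b, b-1)
-- computed with one O(b) running-product loop (objective: faster, asymptotic).

-- ===== PORT A =====
-- while num <= a: rebuild pplfl as the prefix sums of fl, then copy pplfl back into fl.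
-- All indices produced by `range(len(...))` are in range, so pyGetD/pySetD are exact here.
def floorWhile (a : Int) (num : Int) (fl : List Int) (pplfl : List Int) : List Int :=
  if num ≤ a then
    let pplfl' := (List.range fl.length).foldl (fun pp (i : Nat) =>
        PySem.List.pySetD pp (i : Int)
          ((List.range (i+1)).foldl (fun ppl (j : Nat) => ppl + PySem.List.pyGetD fl (j : Int) 0) 0)) pplfl
    let fl' := (List.range fl.length).foldl (fun f (i : Nat) =>
        PySem.List.pySetD f (i : Int) (PySem.List.pyGetD pplfl' (i : Int) 0)) fl
    floorWhile a (num + 1) fl' pplfl'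
  else fl
termination_by (a + 1 - num).toNat
decreasing_by omega

def floor (a : Int) (b : Int) : Int :=
  let fl := PySem.List.pyRange 1 (b+1) 1
  let pplfl := List.replicate b.toNat (0 : Int)
  -- final fl[b-1]: in range exactly when 1 ≤ b (Pre_floor); pyGetD is exact there
  PySem.List.pyGetD (floorWhile a 1 fl pplfl) (b - 1) 0

-- ===== PORT B =====
def floor_alt (a : Int) (b : Int) : Int :=
  if a ≤ 0 then b
  else
    let n := a + b
    let k := b - 1
    (PySem.List.pyRange 1 (k+1) 1).foldl
      (fun r i => PySem.Int.floordiv (r * (n - k + i)) i) 1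

-- ===== PRECONDITION & SPEC =====
-- Pre_ excludes b ≤ 0, where A's final `fl[b-1]` raises IndexError (empty list).
def Pre_floor (a : Int) (b : Int) : Prop := 1 ≤ b
instance (a : Int) (b : Int) : Decidable (Pre_floor a b) := by unfold Pre_floor; infer_instance
def pvWitness_floor : Int × Int := (3, 4)

def Spec_floor (a : Int) (b : Int) (out : Int) : Prop := out = floor_alt a b
instance (a : Int) (b : Int) (out : Int) : Decidable (Spec_floor a b out) := by unfold Spec_floor; infer_instance

-- ===== CLAIM (what is proved, stated in full; the proofs are below) =====
def Claim_equal_floor : Prop := ∀ (a : Int) (b : Int), Dom_floor a b → Pre_floor a b → Spec_floor a b (floor a b)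

-- ===== LEMMAS AND PROOFS =====

-- After t passes of A's loop, room i (0-based) of floor t holds C(t+i+1, t+1).
def chooseRow (t b : Nat) : List Int :=
  (List.range b).map (fun i => ((t + i + 1).choose (t + 1) : Int))

theorem chooseRow_length (t b : Nat) : (chooseRow t b).length = b := by
  simp [chooseRow]

theorem chooseRow_getD (t b i : Nat) (hi : i < b) :
    (chooseRow t b).getD i 0 = ((t + i + 1).choose (t + 1) : Int) := by
  simp [chooseRow, List.getD, List.getElem?_map, List.getElem?_range hi]

theorem chooseRow_zero (b : Int) :
    PySem.List.pyRange 1 (b+1) 1 = chooseRow 0 b.toNat := by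
  rw [PySem.List.pyRange_one, chooseRow]
  have : (b + 1 - 1).toNat = b.toNat := by omega
  rw [this]
  apply List.map_congr_left
  intro i _
  simp [Nat.choose_one_right]
  omega

-- A fold that overwrites slot i with g i for every i < k turns the first k slots into map g.
theorem foldl_set_range (g : Nat → Int) (l : List Int) (k : Nat) (hk : k ≤ l.length) :
    (List.range k).foldl (fun pp (i : Nat) => PySem.List.pySetD pp (i : Int) (g i)) l
      = (List.range k).map g ++ l.drop k := by
  induction k with
  | zero => simp
  | succ k ih =>
    rw [List.range_succ, List.foldl_append, List.map_append, ih (by omega)]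
    have hlen : ((List.range k).map g ++ l.drop k).length = l.length := by
      simp; omega
    simp only [List.foldl_cons, List.foldl_nil, PySem.List.pySetD_natCast]
    have hdrop : l.drop k = l[k] :: l.drop (k+1) := by
      exact (List.drop_eq_getElem_cons (by omega)).trans rfl
    rw [hdrop, List.set_append_right _ _ (by simp), List.append_assoc]
    have hlen2 : (List.map g (List.range k)).length = k := by simp
    rw [hlen2, Nat.sub_self, List.set_cons_zero]
    simp

-- The inner j-loop over chooseRow t b sums a hockey stick: Σ_{j≤i} C(t+j+1,t+1) = C(t+i+2,t+2).
theorem inner_sum_chooseRow (t b i : Nat) (hi : i < b) :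
    (List.range (i+1)).foldl (fun ppl (j : Nat) => ppl + PySem.List.pyGetD (chooseRow t b) (j : Int) 0) 0
      = ((t + i + 2).choose (t + 2) : Int) := by
  induction i with
  | zero =>
    simp only [List.range_one, List.foldl_cons, List.foldl_nil, Nat.cast_zero, zero_add,
      PySem.List.pyGetD_zero, chooseRow_getD t b 0 (by omega)]
    norm_num
  | succ i ih =>
    rw [List.range_succ, List.foldl_append, ih (by omega)]
    simp only [List.foldl_cons, List.foldl_nil, PySem.List.pyGetD_natCast,
      chooseRow_getD t b (i+1) hi]
    have h := Nat.choose_succ_succ (t + i + 2) (t + 1)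
    have e1 : t + (i+1) + 2 = t + i + 2 + 1 := by omega
    have e2 : t + (i+1) + 1 = t + i + 2 := by omega
    rw [e1, e2, h]
    push_cast
    ring

-- One iteration of the while-body maps chooseRow t b to chooseRow (t+1) b.
theorem pass_eq (t b : Nat) (pplfl : List Int) (hp : pplfl.length = b) :
    (List.range (chooseRow t b).length).foldl (fun pp (i : Nat) =>
        PySem.List.pySetD pp (i : Int)
          ((List.range (i+1)).foldl
            (fun ppl (j : Nat) => ppl + PySem.List.pyGetD (chooseRow t b) (j : Int) 0) 0)) pplfl
      = chooseRow (t+1) b := by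
  rw [chooseRow_length,
    foldl_set_range _ _ b (by omega), List.drop_of_length_le (by omega), List.append_nil]
  conv_rhs => rw [chooseRow]
  apply List.map_congr_left
  intro i hi
  rw [inner_sum_chooseRow t b i (List.mem_range.mp hi),
    show t + 1 + i + 1 = t + i + 2 from by omega, show t + 1 + 1 = t + 2 from by omega]

-- The copy loop rebuilds pplfl' itself.
theorem copy_eq (fl pplfl : List Int) (hp : pplfl.length = fl.length) :
    (List.range fl.length).foldl (fun f (i : Nat) =>
        PySem.List.pySetD f (i : Int) (PySem.List.pyGetD pplfl (i : Int) 0)) fl = pplfl := by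
  rw [foldl_set_range _ _ fl.length le_rfl, List.drop_of_length_le le_rfl, List.append_nil]
  apply List.ext_getElem (by simp [hp])
  intro i h1 h2
  simp only [List.getElem_map, List.getElem_range, PySem.List.pyGetD_natCast]
  rw [List.getD_eq_getElem _ _ (by simp at h1; omega)]

theorem floorWhile_eq (a : Int) (b : Nat) :
    ∀ (n : Nat) (num : Int) (t : Nat) (pplfl : List Int),
      pplfl.length = b → n = (a + 1 - num).toNat →
      floorWhile a num (chooseRow t b) pplfl = chooseRow (t + n) b := by
  intro n
  induction n with
  | zero =>
    intro num t pplfl hp hn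
    rw [floorWhile, if_neg (by omega)]
    norm_num
  | succ n ih =>
    intro num t pplfl hp hn
    rw [floorWhile, if_pos (by omega)]
    simp only
    rw [pass_eq t b pplfl hp, copy_eq _ _ (by simp [chooseRow_length]),
      ih (num + 1) (t + 1) _ (chooseRow_length _ _) (by omega)]
    congr 1
    omega

-- A's value in closed form.
theorem floor_closed (a b : Int) (hb : 1 ≤ b) :
    floor a b = ((a.toNat + b.toNat).choose (a.toNat + 1) : Int) := by
  simp only [floor]
  rw [chooseRow_zero,
    floorWhile_eq a b.toNat a.toNat 1 0 _ (by simp) (by omega), Nat.zero_add,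
    PySem.List.pyGetD_eq_getElem _ _ (by omega) (by rw [chooseRow_length]; omega)]
  simp only [chooseRow, List.getElem_map, List.getElem_range]
  congr 2
  omega

-- B's running product: after m steps the accumulator is C(n-k+m, m) (exact division at each step).
theorem prod_inv (n k : Nat) (hk : k ≤ n) :
    ∀ m, m ≤ k →
      (PySem.List.pyRange 1 ((m : Int) + 1) 1).foldl
          (fun r i => PySem.Int.floordiv (r * ((n : Int) - (k : Int) + i)) i) 1
        = ((n - k + m).choose m : Int) := by
  intro m
  induction m with
  | zero =>
    intro _
    rw [PySem.List.pyRange_one_eq_nil (by omega)]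
    simp
  | succ m ih =>
    intro hm
    rw [show ((m + 1 : Nat) : Int) + 1 = ((m : Int) + 1) + 1 by omega,
      PySem.List.pyRange_one_succ_right (by omega), List.foldl_append, ih (by omega)]
    simp only [List.foldl_cons, List.foldl_nil]
    have e1 : ((n - k + m).choose m : Int) * ((n : Int) - (k : Int) + ((m : Int) + 1))
        = (((n - k + m).choose m * (n - k + m + 1) : Nat) : Int) := by
      have : (n : Int) - (k : Int) = ((n - k : Nat) : Int) := by omega
      rw [this]; push_cast; ring
    rw [e1, show ((m : Int) + 1) = ((m + 1 : Nat) : Int) by omega,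
      PySem.Int.floordiv_natCast]
    congr 1
    have h2 : (n - k + m).choose m * (n - k + m + 1) = (n - k + m + 1).choose (m + 1) * (m + 1) := by
      rw [Nat.mul_comm]
      exact Nat.add_one_mul_choose_eq (n - k + m) m
    rw [h2, Nat.mul_div_cancel _ (by omega)]
    rfl

-- B's value in closed form.
theorem floor_alt_closed (a b : Int) (ha : 1 ≤ a) (hb : 1 ≤ b) :
    floor_alt a b = (((a + b).toNat).choose (b - 1).toNat : Int) := by
  rw [floor_alt, if_neg (by omega)]
  simp only
  have e2 : b - 1 = (((b - 1).toNat : Nat) : Int) := by omega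
  have e1 : a + b = (((a + b).toNat : Nat) : Int) := by omega
  rw [e2, e1]
  simp only [Int.toNat_natCast]
  have h := prod_inv (a + b).toNat (b - 1).toNat (by omega) (b - 1).toNat le_rfl
  rw [Nat.sub_add_cancel (by omega)] at h
  exact h

-- ===== VERDICT (by name: the statement is the Claim_ definition above) =====
theorem floor_spec : Claim_equal_floor := by
  intro a b _ hb
  replace hb : 1 ≤ b := hb
  unfold Spec_floor
  by_cases ha : a ≤ 0
  · -- a ≤ 0: A's while loop never runs, B returns b directly.
    rw [floor_closed a b hb, floor_alt, if_pos ha]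
    have h0 : a.toNat = 0 := by omega
    rw [h0]
    simp only [Nat.zero_add, Nat.choose_one_right]
    omega
  · rw [floor_closed a b hb, floor_alt_closed a b (by omega) hb]
    have h1 : (a + b).toNat = a.toNat + b.toNat := by omega
    have h2 : (b - 1).toNat = b.toNat - 1 := by omega
    rw [h1, h2]
    have hsym := Nat.choose_symm (n := a.toNat + b.toNat) (k := a.toNat + 1) (by omega)
    rw [← hsym, show a.toNat + b.toNat - (a.toNat + 1) = b.toNat - 1 from by omega]
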